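-- pv_equiv track=rewrite | github.com/dsparber/CIS-521 | r2d2/ec2/r2d2_hw2.py | path2move
-- ===== SOURCE A (Python) =====
-- def path2move(path):
--     moves = []
--     current_direction = None
--     current_count = None
--     for i in range(1, len(path)):
--         prev = path[i - 1]
--         cur = path[i]
--
--         dY = cur[0] - prev[0]
--         dX = cur[1] - prev[1]
--
--         if dX == 1:
--             direction = 'east'
--         elif dX == -1:
--             direction = 'west'
--         elif dY == 1:
--             direction = 'south'
--         else:
--             direction = 'north'
--
--         if current_direction == direction:
--             current_count += 1
--         else:
--             if current_direction:
--                 moves.append((current_direction, current_count))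
--             current_direction, current_count = (direction, 1)
--
--     if current_direction:
--         moves.append((current_direction, current_count))
--
--     return moves
-- ===== SOURCE B (Python) =====
-- def path2move(path):
--     # map phase: one direction label per adjacent pair, then run-length-encode
--     dirs = [_pv_dir(p, q) for p, q in zip(path, path[1:])]
--     moves = []
--     i = 0
--     n = len(dirs)
--     while i < n:
--         j = i
--         while j < n and dirs[j] == dirs[i]:
--             j += 1
--         moves.append((dirs[i], j - i))
--         i = j
--     return moves
--
--
-- def _pv_dir(prev, cur):
--     dY = cur[0] - prev[0]
--     dX = cur[1] - prev[1]
--     if dX == 1: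
--         return 'east'
--     elif dX == -1:
--         return 'west'
--     elif dY == 1:
--         return 'south'
--     else:
--         return 'north'
-- ===== Notes on version B (the rewrite author's own statement) =====
-- stated objective: alternative
-- what changed: Replaces A's fused single-pass accumulator (current_direction/current_count threaded through one loop with flush-on-change) by a two-phase map-then-group decomposition: first map adjacent pairs to a direction list, then run-length-encode that list with an index scan.
import Mathlib
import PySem

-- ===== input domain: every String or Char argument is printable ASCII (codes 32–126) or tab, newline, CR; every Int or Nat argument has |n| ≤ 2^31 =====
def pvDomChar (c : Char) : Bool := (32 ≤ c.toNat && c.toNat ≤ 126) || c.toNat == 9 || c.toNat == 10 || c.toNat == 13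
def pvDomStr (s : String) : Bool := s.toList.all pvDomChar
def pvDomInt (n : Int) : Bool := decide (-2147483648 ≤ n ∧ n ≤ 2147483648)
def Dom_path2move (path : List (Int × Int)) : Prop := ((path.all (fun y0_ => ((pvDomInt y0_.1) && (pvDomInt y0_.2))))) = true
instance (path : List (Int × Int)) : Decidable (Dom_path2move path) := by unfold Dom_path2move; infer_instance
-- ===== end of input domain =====

-- B replaces A's fused accumulator loop by a map phase (direction per adjacent pair)
-- followed by a separate run-length-encoding pass; same return value, similar cost.

-- ===== PORT A =====
def path2move (path : List (Int × Int)) : List (String × Int) :=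
  -- state: (moves, current_direction/current_count packed as Option — Python's None)
  let st := (PySem.List.pyRange 1 (path.length : Int) 1).foldl
    (fun (st : List (String × Int) × Option (String × Int)) i =>
      let prev := PySem.List.pyGetD path (i - 1) (0, 0)   -- index always in range
      let cur := PySem.List.pyGetD path i (0, 0)
      let dY := cur.1 - prev.1
      let dX := cur.2 - prev.2
      let direction := if dX = 1 then "east" else if dX = -1 then "west"
        else if dY = 1 then "south" else "north"
      match st.2 with
      | some (d, c) =>
          if d = direction then (st.1, some (d, c + 1))
          else (st.1 ++ [(d, c)], some (direction, 1))
      | none => (st.1, some (direction, 1)))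
    ([], none)
  match st.2 with
  | some (d, c) => st.1 ++ [(d, c)]
  | none => st.1

-- ===== PORT B =====
-- Source B's inner while scans the current run (= takeWhile) and jumps i past it (= drop);
-- the outer while is this recursion on the remaining suffix.
def path2moveRLE : List String → List (String × Int)
  | [] => []
  | d :: rest =>
      let run := rest.takeWhile (fun e => e == d)
      (d, (1 : Int) + run.length) :: path2moveRLE (rest.drop run.length)
  termination_by ds => ds.length
  decreasing_by simp

def path2move_alt (path : List (Int × Int)) : List (String × Int) :=
  let dirs := (path.zip (path.drop 1)).map (fun pq =>
    let dY := pq.2.1 - pq.1.1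
    let dX := pq.2.2 - pq.1.2
    if dX = 1 then "east" else if dX = -1 then "west"
    else if dY = 1 then "south" else "north")
  path2moveRLE dirs

-- ===== PRECONDITION & SPEC =====
def Spec_path2move (path : List (Int × Int)) (out : List (String × Int)) : Prop := out = path2move_alt path
instance (path : List (Int × Int)) (out : List (String × Int)) : Decidable (Spec_path2move path out) := by unfold Spec_path2move; infer_instance

-- ===== CLAIM (what is proved, stated in full; the proofs are below) =====
def Claim_equal_path2move : Prop := ∀ (path : List (Int × Int)), Dom_path2move path → Spec_path2move path (path2move path)

-- ===== LEMMAS AND PROOFS =====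

def pvDir (p q : Int × Int) : String :=
  if q.2 - p.2 = 1 then "east" else if q.2 - p.2 = -1 then "west"
  else if q.1 - p.1 = 1 then "south" else "north"

def pvStep (st : List (String × Int) × Option (String × Int)) (direction : String) :
    List (String × Int) × Option (String × Int) :=
  match st.2 with
  | some (d, c) =>
      if d = direction then (st.1, some (d, c + 1))
      else (st.1 ++ [(d, c)], some (direction, 1))
  | none => (st.1, some (direction, 1))

def pvFlush (st : List (String × Int) × Option (String × Int)) : List (String × Int) :=
  match st.2 with
  | some (d, c) => st.1 ++ [(d, c)]
  | none => st.1

lemma pv_map_range (path : List (Int × Int)) :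
    (PySem.List.pyRange 1 (path.length : Int) 1).map
      (fun i => (PySem.List.pyGetD path (i - 1) ((0:Int), (0:Int)), PySem.List.pyGetD path i ((0:Int), (0:Int))))
      = path.zip (path.drop 1) := by
  apply List.ext_getElem
  · simp [PySem.List.length_pyRange_one]
  · intro k hk hk'
    simp only [List.getElem_map, PySem.List.getElem_pyRange_one]
    have hlen : k < path.length - 1 := by
      simpa [PySem.List.length_pyRange_one] using hk
    have h1 : (1 : Int) + (k : Int) - 1 = (k : Int) := by ring
    have h2 : (1 : Int) + (k : Int) = ((k + 1 : Nat) : Int) := by push_cast; ring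
    rw [List.getElem_zip]
    rw [h1, h2, PySem.List.pyGetD_natCast, PySem.List.pyGetD_natCast]
    have hk1 : k < path.length := by omega
    have hk2 : k + 1 < path.length := by omega
    simp [List.getD_eq_getElem?_getD, hk1, hk2]

lemma pv_A_as_fold (path : List (Int × Int)) :
    path2move path = pvFlush ((path.zip (path.drop 1)).foldl (fun st pq => pvStep st (pvDir pq.1 pq.2)) ([], none)) := by
  rw [← pv_map_range path, List.foldl_map]
  rfl

lemma pv_alt_as_fold (path : List (Int × Int)) :
    path2move_alt path = path2moveRLE ((path.zip (path.drop 1)).map (fun pq => pvDir pq.1 pq.2)) := by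
  rfl

lemma pv_rle_carry (ds : List String) :
    ∀ (moves : List (String × Int)) (d : String) (c : Int),
      pvFlush (ds.foldl pvStep (moves, some (d, c)))
        = moves ++ (d, c + ((ds.takeWhile (fun e => e == d)).length : Int))
            :: path2moveRLE (ds.drop (ds.takeWhile (fun e => e == d)).length) := by
  induction ds with
  | nil => intro moves d c; simp [pvFlush, path2moveRLE]
  | cons e t ih =>
    intro moves d c
    by_cases h : d = e
    · subst h
      have hb : (d == d) = true := by simp
      simp only [List.foldl_cons, pvStep, List.takeWhile_cons, hb, if_true,
        List.length_cons, List.drop_succ_cons]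
      rw [ih moves d (c + 1)]
      congr 2
      push_cast
      exact Prod.ext rfl (by ring)
    · have hb : (e == d) = false := by simp [Ne.symm h]
      simp only [List.foldl_cons, pvStep, if_neg h, List.takeWhile_cons, hb]
      rw [ih (moves ++ [(d, c)]) e 1]
      simp [path2moveRLE]

lemma pv_fold_eq_rle (ds : List String) :
    pvFlush (ds.foldl pvStep ([], none)) = path2moveRLE ds := by
  cases ds with
  | nil => simp [pvFlush, path2moveRLE]
  | cons e t =>
    have : pvStep ([], none) e = ([], some (e, 1)) := rfl
    rw [List.foldl_cons, this, pv_rle_carry t [] e 1]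
    simp [path2moveRLE]

-- ===== VERDICT (by name: the statement is the Claim_ definition above) =====
theorem path2move_spec : Claim_equal_path2move := by
  intro path _
  unfold Spec_path2move
  rw [pv_A_as_fold, pv_alt_as_fold, ← pv_fold_eq_rle, List.foldl_map]
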